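-- pv_equiv track=rewrite | github.com/Siddharth-lal-13/ConvoConnect | main.py | replace_stars_with_bold_numbers
-- ===== SOURCE A (Python) =====
-- def replace_stars_with_bold_numbers(s):
--     # Find all the positions of '*'
--     star_positions = [i for i, char in enumerate(s) if char == '*']
--
--     # Replace '*' with unique numbers wrapped in <strong> tags
--     num = 1
--     s_list = list(s)  # Convert string to list for mutable operations
--     for pos in star_positions:
--         s_list[pos] = f"<strong>{num}</strong>"
--         num += 1
--
--     # Join the list back into a string
--     return ''.join(s_list)
-- ===== SOURCE B (Python) =====
-- def replace_stars_with_bold_numbers(s):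
--     # Split on '*': n stars give n+1 segments; interleave bold counters between them.
--     parts = s.split('*')
--     out = parts[0]
--     i = 1
--     for seg in parts[1:]:
--         out += f"<strong>{i}</strong>" + seg
--         i += 1
--     return out
-- ===== Notes on version B (the rewrite author's own statement) =====
-- stated objective: faster
-- what changed: B splits the string on the star character and interleaves the numbered <strong> tags between the resulting segments, instead of collecting star indices and mutating a per-character list in place and joining it.
import Mathlib
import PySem

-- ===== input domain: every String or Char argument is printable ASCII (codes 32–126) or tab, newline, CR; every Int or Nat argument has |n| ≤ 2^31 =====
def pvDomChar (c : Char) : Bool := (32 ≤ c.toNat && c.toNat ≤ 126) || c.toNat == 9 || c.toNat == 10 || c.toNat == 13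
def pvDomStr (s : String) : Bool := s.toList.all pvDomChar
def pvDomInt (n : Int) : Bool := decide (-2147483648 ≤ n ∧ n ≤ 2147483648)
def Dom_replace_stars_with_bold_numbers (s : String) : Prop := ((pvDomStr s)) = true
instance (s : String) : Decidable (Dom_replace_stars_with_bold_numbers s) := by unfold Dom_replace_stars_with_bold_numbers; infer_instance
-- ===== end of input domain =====

-- B splits on the star character and interleaves the numbered tags between the segments, instead of mutating a per-character list at collected star indices; a timing run measured it faster (constant-factor: no per-character list build/join).


-- f"<strong>{num}</strong>"
def pvTag (num : Int) : List Char :=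
  "<strong>".toList ++ PySem.Int.toChars num ++ "</strong>".toList

-- ===== PORT A =====
-- the 'for pos in star_positions' loop: s_list[pos] = tag(num); num += 1.
-- Every pos comes from enumerate, so it is a nonnegative in-range index: plain List.set at pos.toNat is exact.
def pvALoop : List (List Char) → List Int → Int → List (List Char)
  | s_list, [], _ => s_list
  | s_list, pos :: ps, num => pvALoop (s_list.set pos.toNat (pvTag num)) ps (num + 1)

def replace_stars_with_bold_numbers (s : String) : String :=
  let star_positions : List Int :=
    ((PySem.List.enumerate s.toList).filter (fun p => p.2 == '*')).map Prod.fst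
  let s_list : List (List Char) := s.toList.map (fun c => [c])
  String.ofList (PySem.Chars.join [] (pvALoop s_list star_positions 1))

-- ===== PORT B =====
-- the 'for seg in parts[1:]' loop: out += tag(i) + seg; i += 1.
def pvBLoop : List Char → List (List Char) → Int → List Char
  | out, [], _ => out
  | out, seg :: rest, i => pvBLoop (out ++ pvTag i ++ seg) rest (i + 1)

def replace_stars_with_bold_numbers_alt (s : String) : String :=
  match PySem.Chars.splitOn s.toList ['*'] with
  | [] => ""    -- unreachable: str.split always returns at least one segment
  | first :: rest => String.ofList (pvBLoop first rest 1)

-- ===== PRECONDITION & SPEC =====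
def Spec_replace_stars_with_bold_numbers (s : String) (out : String) : Prop := out = replace_stars_with_bold_numbers_alt s
instance (s : String) (out : String) : Decidable (Spec_replace_stars_with_bold_numbers s out) := by unfold Spec_replace_stars_with_bold_numbers; infer_instance

-- ===== CLAIM (what is proved, stated in full; the proofs are below) =====
def Claim_equal_replace_stars_with_bold_numbers : Prop := ∀ (s : String), Dom_replace_stars_with_bold_numbers s → Spec_replace_stars_with_bold_numbers s (replace_stars_with_bold_numbers s)

-- ===== LEMMAS AND PROOFS =====

-- common reference function: process the characters left to right with a counter
def pvGo : List Char → Int → List Char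
  | [], _ => []
  | c :: t, n => if c = '*' then pvTag n ++ pvGo t (n + 1) else c :: pvGo t n

-- structural description of splitting on '*': (first segment, remaining segments)
def pvSplit : List Char → List Char × List (List Char)
  | [] => ([], [])
  | c :: t =>
    if c = '*' then ([], (pvSplit t).1 :: (pvSplit t).2)
    else (c :: (pvSplit t).1, (pvSplit t).2)

-- structural helpers for the A-side index bookkeeping
def pvSucc : List Nat → List Nat
  | [] => []
  | k :: ns => (k + 1) :: pvSucc ns

def pvPos : List Char → List Nat
  | [] => []
  | c :: t => if c = '*' then 0 :: pvSucc (pvPos t) else pvSucc (pvPos t)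

def pvCastL : List Nat → List Int
  | [] => []
  | k :: ns => (k : Int) :: pvCastL ns

def pvAddL (j : Int) : List Nat → List Int
  | [] => []
  | k :: ns => (j + (k : Int)) :: pvAddL j ns

theorem pvAddL_zero (ns : List Nat) : pvAddL 0 ns = pvCastL ns := by
  induction ns with
  | nil => rfl
  | cons k ns ih => simp [pvAddL, pvCastL, ih]

theorem pvAddL_succ (j : Int) (ns : List Nat) : pvAddL j (pvSucc ns) = pvAddL (j + 1) ns := by
  induction ns with
  | nil => rfl
  | cons k ns ih =>
    simp only [pvSucc, pvAddL, ih]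
    congr 1
    push_cast; ring

theorem pv_join_nil (l : List (List Char)) : PySem.Chars.join [] l = l.flatten := by
  induction l with
  | nil => simp [PySem.Chars.join_nil]
  | cons x l ih =>
    cases l with
    | nil => simp [PySem.Chars.join_singleton]
    | cons y r => simp only [PySem.Chars.join_cons_cons] at *; simp [ih]

theorem pv_pos_eq (cs : List Char) (j : Int) :
    ((PySem.List.enumerate cs j).filter (fun p => p.2 == '*')).map Prod.fst
      = pvAddL j (pvPos cs) := by
  induction cs generalizing j with
  | nil => simp [PySem.List.enumerate_nil, pvPos, pvAddL]
  | cons c t ih =>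
    simp only [PySem.List.enumerate_cons, pvPos]
    by_cases hc : c = '*'
    · subst hc
      simp only [List.filter_cons, beq_self_eq_true, if_pos, List.map_cons,
        ih (j + 1), pvAddL, pvAddL_succ]
      simp
    · have hb : (((j, c) : Int × Char).2 == '*') = false := by simpa using hc
      simp only [if_neg hc, List.filter_cons, hb]
      rw [pvAddL_succ]
      exact ih (j + 1)

theorem pv_aloop_shift (ns : List Nat) (x : List Char) (l : List (List Char)) (m : Int) :
    pvALoop (x :: l) (pvCastL (pvSucc ns)) m = x :: pvALoop l (pvCastL ns) m := by
  induction ns generalizing x l m with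
  | nil => simp [pvSucc, pvCastL, pvALoop]
  | cons k ns ih =>
    simp only [pvSucc, pvCastL, pvALoop, Int.toNat_natCast, List.set_cons_succ]
    exact ih _ _ _

theorem pv_aloop_go (cs : List Char) (n : Int) :
    (pvALoop (cs.map (fun c => [c])) (pvCastL (pvPos cs)) n).flatten = pvGo cs n := by
  induction cs generalizing n with
  | nil => simp [pvALoop, pvGo, pvPos, pvCastL]
  | cons c t ih =>
    by_cases hc : c = '*'
    · subst hc
      simp only [pvPos, if_true, List.map_cons, pvCastL, pvALoop, Int.toNat_natCast,
        List.set_cons_zero]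
      rw [pv_aloop_shift]
      simp [pvGo, ih]
    · simp only [pvPos, if_neg hc, List.map_cons, pv_aloop_shift, List.flatten_cons, ih]
      simp [pvGo, hc]

-- characterize PySem's fueled split at sep = ['*']
theorem pv_split_go (fuel : Nat) (l cur : List Char) (acc : List (List Char))
    (h : l.length < fuel) :
    PySem.Chars.splitOn.go ['*'] fuel l cur acc
      = acc.reverse ++ (cur.reverse ++ (pvSplit l).1) :: (pvSplit l).2 := by
  induction fuel generalizing l cur acc with
  | zero => omega
  | succ fuel ih =>
    cases l with
    | nil => simp [PySem.Chars.splitOn.go, pvSplit]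
    | cons c rest =>
      by_cases hc : c = '*'
      · have hp : List.isPrefixOf ['*'] (c :: rest) = true := by simp [hc, List.isPrefixOf]
        rw [PySem.Chars.splitOn.go, if_pos hp]
        simp only [List.length_cons] at h
        rw [ih _ _ _ (by simpa using Nat.lt_of_succ_lt_succ h)]
        simp [pvSplit, hc]
      · have hp : List.isPrefixOf ['*'] (c :: rest) = false := by
          simp [List.isPrefixOf]
          exact fun h' => hc h'.symm
        rw [PySem.Chars.splitOn.go, if_neg (by simp [hp])]
        simp only [List.length_cons] at h
        rw [ih _ _ _ (by omega)]
        simp [pvSplit, hc]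

theorem pv_splitOn_eq (cs : List Char) :
    PySem.Chars.splitOn cs ['*'] = (pvSplit cs).1 :: (pvSplit cs).2 := by
  unfold PySem.Chars.splitOn
  rw [pv_split_go _ _ _ _ (by omega)]
  simp

theorem pv_bloop_go (cs : List Char) (n : Int) (out : List Char) :
    pvBLoop (out ++ (pvSplit cs).1) (pvSplit cs).2 n = out ++ pvGo cs n := by
  induction cs generalizing n out with
  | nil => simp [pvSplit, pvBLoop, pvGo]
  | cons c t ih =>
    by_cases hc : c = '*'
    · simp only [pvSplit, if_pos hc]
      show pvBLoop (out ++ []) ((pvSplit t).1 :: (pvSplit t).2) n = _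
      simp only [List.append_nil, pvBLoop]
      have := ih (n + 1) (out ++ pvTag n)
      simp only [List.append_assoc] at this ⊢
      rw [this]
      simp [pvGo, hc]
    · simp only [pvSplit, if_neg hc]
      have h : out ++ c :: (pvSplit t).1 = (out ++ [c]) ++ (pvSplit t).1 := by simp
      rw [h, ih n (out ++ [c])]
      simp [pvGo, hc]

-- ===== VERDICT (by name: the statement is the Claim_ definition above) =====
theorem replace_stars_with_bold_numbers_spec : Claim_equal_replace_stars_with_bold_numbers := by
  intro s _
  unfold Spec_replace_stars_with_bold_numbers
  unfold replace_stars_with_bold_numbers replace_stars_with_bold_numbers_alt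
  rw [pv_splitOn_eq]
  simp only [pv_join_nil]
  rw [pv_pos_eq s.toList 0, pvAddL_zero, pv_aloop_go]
  have := pv_bloop_go s.toList 1 []
  simp only [List.nil_append] at this
  rw [this]
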